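-- pv_equiv track=rewrite | github.com/junhg0211/boj | python/5/1235.py | is_differentiable
-- ===== SOURCE A (Python) =====
-- def is_differentiable(codes: list[str], length: int) -> bool:
--     gots = dict()
--     for code in codes:
--         code = code[-length:]
--         if code in gots:
--             return False
--         gots[code] = None
--     return True
-- ===== SOURCE B (Python) =====
-- def is_differentiable(codes: list[str], length: int) -> bool:
--     suffixes = sorted(code[-length:] for code in codes)
--     for i in range(1, len(suffixes)):
--         if suffixes[i - 1] == suffixes[i]:
--             return False
--     return True
-- ===== Notes on version B (the rewrite author's own statement) =====
-- stated objective: alternative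
-- what changed: Replaces the incremental hash-set (dict) membership loop by sorting all suffixes and scanning adjacent pairs for a duplicate: equal suffixes become neighbours after sorting, so no hashing or membership test is needed.
import Mathlib
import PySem

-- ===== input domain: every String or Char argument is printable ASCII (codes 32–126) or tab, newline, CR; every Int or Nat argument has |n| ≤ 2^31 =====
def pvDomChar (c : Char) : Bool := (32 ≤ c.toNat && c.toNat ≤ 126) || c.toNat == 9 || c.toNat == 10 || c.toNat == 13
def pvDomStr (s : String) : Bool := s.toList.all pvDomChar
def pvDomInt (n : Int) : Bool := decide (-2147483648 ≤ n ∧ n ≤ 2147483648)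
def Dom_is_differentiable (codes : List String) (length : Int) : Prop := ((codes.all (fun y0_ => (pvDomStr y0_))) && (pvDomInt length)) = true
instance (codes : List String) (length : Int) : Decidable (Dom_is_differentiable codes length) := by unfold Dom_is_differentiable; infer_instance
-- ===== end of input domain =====

-- B replaces A's incremental hash-set (dict) loop by sorting the suffixes and scanning
-- adjacent pairs for a duplicate (objective: alternative algorithm, no hashing).

-- ===== PORT A =====
-- the loop body of A: check membership in the dict, early-return False, else insert
def pvALoop (length : Int) (gots : PySem.Dict String Unit) : List String → Bool
  | [] => true
  | code :: rest =>
    let code' := PySem.Str.slice code (some (-length)) none   -- code = code[-length:]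
    if (PySem.Dict.contains gots code') then false
    else pvALoop length (PySem.Dict.insert gots code' ()) rest

def is_differentiable (codes : List String) (length : Int) : Bool :=
  pvALoop length PySem.Dict.empty codes

-- ===== PORT B =====
-- the index loop of B: for i in range(1, len(suffixes)): if suffixes[i-1] == suffixes[i]: return False
-- transcribed as the adjacent-pair scan over the sorted list
def pvBLoop : List String → Bool
  | [] => true
  | [_] => true
  | a :: b :: rest => if a == b then false else pvBLoop (b :: rest)

def is_differentiable_alt (codes : List String) (length : Int) : Bool :=
  let suffixes := PySem.List.sorted (codes.map (fun code => PySem.Str.slice code (some (-length)) none)) (fun x => x) false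
  pvBLoop suffixes

-- ===== PRECONDITION & SPEC =====
def Spec_is_differentiable (codes : List String) (length : Int) (out : Bool) : Prop := out = is_differentiable_alt codes length
instance (codes : List String) (length : Int) (out : Bool) : Decidable (Spec_is_differentiable codes length out) := by unfold Spec_is_differentiable; infer_instance

-- ===== CLAIM (what is proved, stated in full; the proofs are below) =====
def Claim_equal_is_differentiable : Prop := ∀ (codes : List String) (length : Int), Dom_is_differentiable codes length → Spec_is_differentiable codes length (is_differentiable codes length)

-- ===== LEMMAS AND PROOFS =====

theorem pv_contains_insert_false (g : PySem.Dict String Unit) (k k' : String) :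
    (g.insert k ()).contains k' = false ↔ (k' ≠ k ∧ g.contains k' = false) := by
  rw [PySem.Dict.contains_insert]
  simp

-- A's loop succeeds iff the suffixes are pairwise distinct (and none is already stored)
theorem pv_aLoop_iff (length : Int) :
    ∀ (l : List String) (g : PySem.Dict String Unit),
      pvALoop length g l = true ↔
        ((l.map (fun c => PySem.Str.slice c (some (-length)) none)).Nodup ∧
         ∀ c ∈ l, g.contains (PySem.Str.slice c (some (-length)) none) = false) := by
  intro l
  induction l with
  | nil => intro g; simp [pvALoop]
  | cons c rest ih =>
    intro g
    by_cases hc : g.contains (PySem.Str.slice c (some (-length)) none) = true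
    · simp only [pvALoop, hc, if_true]
      constructor
      · intro h; exact absurd h (by simp)
      · rintro ⟨_, hcon⟩
        have := hcon c (List.mem_cons_self)
        rw [this] at hc; exact absurd hc (by simp)
    · have hcf : g.contains (PySem.Str.slice c (some (-length)) none) = false :=
        Bool.not_eq_true _ ▸ (by simpa using hc)
      simp only [pvALoop, hcf, Bool.false_eq_true, if_false, ih, List.map_cons,
        List.nodup_cons, List.mem_map, List.mem_cons]
      constructor
      · rintro ⟨hnd, hcon⟩
        have hne : ∀ s ∈ rest,
            PySem.Str.slice s (some (-length)) none ≠ PySem.Str.slice c (some (-length)) none :=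
          fun s hs => ((pv_contains_insert_false g _ _).mp (hcon s hs)).1
        refine ⟨⟨fun ⟨s, hs, h⟩ => hne s hs h, hnd⟩, ?_⟩
        rintro s (rfl | hs)
        · exact hcf
        · exact ((pv_contains_insert_false g _ _).mp (hcon s hs)).2
      · rintro ⟨⟨hnm, hnd⟩, hcon⟩
        refine ⟨hnd, fun s hs => (pv_contains_insert_false g _ _).mpr
          ⟨fun h => hnm ⟨s, hs, h⟩, hcon s (Or.inr hs)⟩⟩

-- B's adjacent scan succeeds iff no two neighbours are equal
theorem pv_bLoop_iff : ∀ (l : List String), pvBLoop l = true ↔ l.IsChain (· ≠ ·) := by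
  intro l
  induction l with
  | nil => simp [pvBLoop]
  | cons a rest ih =>
    cases rest with
    | nil => simp [pvBLoop]
    | cons b rest' =>
      by_cases hab : a = b
      · subst hab; simp [pvBLoop, List.isChain_cons_cons]
      · simp only [pvBLoop, beq_iff_eq, hab, if_false, ih, List.isChain_cons_cons]
        tauto

-- on a ≤-sorted list, no adjacent duplicates ⇔ no duplicates at all
theorem pv_chain_ne_iff_nodup (l : List String) (hs : l.Pairwise (· ≤ ·)) :
    l.IsChain (· ≠ ·) ↔ l.Nodup := by
  constructor
  · intro hc
    have hlt : l.IsChain (· < ·) := by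
      have hsc : l.IsChain (· ≤ ·) := hs.isChain
      rw [List.isChain_iff_getElem] at hsc hc ⊢
      intro i hi
      exact lt_of_le_of_ne (hsc i hi) (hc i hi)
    have : l.Pairwise (· < ·) := List.isChain_iff_pairwise.mp hlt
    exact this.imp ne_of_lt
  · intro hn
    exact (hn.imp (by tauto)).isChain

-- ===== VERDICT (by name: the statement is the Claim_ definition above) =====
theorem is_differentiable_spec : Claim_equal_is_differentiable := by
  intro codes length _
  unfold Spec_is_differentiable is_differentiable is_differentiable_alt
  set sfx := codes.map (fun code => PySem.Str.slice code (some (-length)) none) with hsfx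
  rw [Bool.eq_iff_iff, pv_aLoop_iff, pv_bLoop_iff,
    pv_chain_ne_iff_nodup _ (PySem.List.sorted_pairwise sfx (fun x => x) )]
  have hperm : (PySem.List.sorted sfx (fun x => x) false).Perm sfx :=
    PySem.List.sorted_perm sfx (fun x => x) false
  rw [hperm.nodup_iff]
  constructor
  · exact fun h => h.1
  · intro h
    exact ⟨h, fun c _ => by simp [PySem.Dict.contains, PySem.Dict.empty]⟩
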